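-- pv_equiv track=rewrite | github.com/peterdoohan/knowledgeBase | scripts/build_subtopic_candidates.py | provisional_label
-- ===== SOURCE A (Python) =====
-- from typing import Any, Dict, Iterable, List, Set, Tuple
--
-- def provisional_label(parent_label: str, top_terms: Dict[str, List[str]]) -> str:
--     parts: List[str] = []
--     for category in ("keywords", "frameworks", "brain_regions", "tasks"):
--         for term in top_terms.get(category, []):
--             if term and term not in parts:
--                 parts.append(term)
--             if len(parts) >= 3:
--                 break
--         if len(parts) >= 3:
--             break
--     if not parts:
--         return f"{parent_label} Subtopic"
--     return f"{parent_label}: " + ", ".join(part.replace("_", " ") for part in parts[:3])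
-- ===== SOURCE B (Python) =====
-- def provisional_label(parent_label: str, top_terms) -> str:
--     # Materialize the truthy terms of the four categories in order, once.
--     stream = [t
--               for category in ("keywords", "frameworks", "brain_regions", "tasks")
--               for t in top_terms.get(category, [])
--               if t]
--     # Selection by staged passes: for each of the 3 slots, rescan the whole
--     # stream from the start for the first term not yet chosen.
--     parts = []
--     for _ in range(3):
--         nxt = next((t for t in stream if t not in parts), None)
--         if nxt is None:
--             break
--         parts.append(nxt)
--     if not parts:
--         return f"{parent_label} Subtopic"
--     return f"{parent_label}: " + ", ".join(p.replace("_", " ") for p in parts)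
-- ===== Notes on version B (the rewrite author's own statement) =====
-- stated objective: alternative
-- what changed: Replaces A's single accumulating pass with nested early-breaks by selection in staged passes: materialize the ordered truthy stream once, then for each of the 3 output slots rescan the stream from the start for the first term not yet chosen.
import Mathlib
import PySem

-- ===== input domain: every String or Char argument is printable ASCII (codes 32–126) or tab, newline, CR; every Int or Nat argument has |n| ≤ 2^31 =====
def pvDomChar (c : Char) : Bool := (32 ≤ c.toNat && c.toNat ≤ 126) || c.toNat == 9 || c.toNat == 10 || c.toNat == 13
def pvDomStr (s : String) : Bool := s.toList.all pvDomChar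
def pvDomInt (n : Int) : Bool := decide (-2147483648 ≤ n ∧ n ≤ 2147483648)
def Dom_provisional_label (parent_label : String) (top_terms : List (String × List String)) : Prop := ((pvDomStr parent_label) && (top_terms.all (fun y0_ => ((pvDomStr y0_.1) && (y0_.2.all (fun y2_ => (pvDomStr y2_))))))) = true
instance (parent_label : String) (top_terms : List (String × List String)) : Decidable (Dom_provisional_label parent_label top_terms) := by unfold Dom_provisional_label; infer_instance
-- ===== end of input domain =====

-- B replaces A's single accumulating pass with nested early breaks by selection in staged
-- passes: materialize the ordered truthy stream once, then for each of the 3 output slots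
-- rescan the stream from the start for the first term not yet chosen (objective: alternative).

-- ===== PORT A =====
-- inner loop: `for term in top_terms.get(category, []): …` with the break at len(parts) >= 3
def pvInnerA (parts : List String) : List String → List String
  | [] => parts
  | t :: ts =>
      let parts' := if t ≠ "" ∧ t ∉ parts then parts ++ [t] else parts
      if 3 ≤ parts'.length then parts' else pvInnerA parts' ts

-- outer loop over the fixed category tuple, with its own break at len(parts) >= 3
def pvOuterA (top_terms : List (String × List String)) (parts : List String) : List String → List String
  | [] => parts
  | c :: cs =>
      let parts' := pvInnerA parts ((PySem.Dict.mk top_terms).getD c [])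
      if 3 ≤ parts'.length then parts' else pvOuterA top_terms parts' cs

def provisional_label (parent_label : String) (top_terms : List (String × List String)) : String :=
  let parts := pvOuterA top_terms [] ["keywords", "frameworks", "brain_regions", "tasks"]
  if parts = [] then parent_label ++ " Subtopic"
  else parent_label ++ ": " ++
    PySem.Str.join ", " ((PySem.List.slice parts none (some 3) : List String).map
      (fun p => PySem.Str.replace p "_" " "))

-- ===== PORT B =====
-- the one-time materialized stream of truthy terms, in category order
def pvStreamB (top_terms : List (String × List String)) : List String :=
  (["keywords", "frameworks", "brain_regions", "tasks"].flatMap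
      (fun c => (PySem.Dict.mk top_terms).getD c [])).filter (fun t => t ≠ "")

-- `for _ in range(3): nxt = next((t for t in stream if t not in parts), None); …`
def pvPickB (stream : List String) (parts : List String) : Nat → List String
  | 0 => parts
  | Nat.succ n =>
      match stream.find? (fun t => !parts.contains t) with
      | none => parts                    -- break
      | some t => pvPickB stream (parts ++ [t]) n

def provisional_label_alt (parent_label : String) (top_terms : List (String × List String)) : String :=
  let stream := pvStreamB top_terms
  let parts := pvPickB stream [] 3
  if parts = [] then parent_label ++ " Subtopic"
  else parent_label ++ ": " ++
    PySem.Str.join ", " (parts.map (fun p => PySem.Str.replace p "_" " "))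

-- ===== PRECONDITION & SPEC =====
def Spec_provisional_label (parent_label : String) (top_terms : List (String × List String)) (out : String) : Prop := out = provisional_label_alt parent_label top_terms
instance (parent_label : String) (top_terms : List (String × List String)) (out : String) : Decidable (Spec_provisional_label parent_label top_terms out) := by unfold Spec_provisional_label; infer_instance

-- ===== CLAIM (what is proved, stated in full; the proofs are below) =====
def Claim_equal_provisional_label : Prop := ∀ (parent_label : String) (top_terms : List (String × List String)), Dom_provisional_label parent_label top_terms → Spec_provisional_label parent_label top_terms (provisional_label parent_label top_terms)

-- ===== LEMMAS AND PROOFS =====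

-- folding Set.add only appends: the accumulator is a prefix of the result
theorem pv_foldl_add_prefix (parts : List String) (xs : List String) :
    parts <+: xs.foldl PySem.Set.add parts := by
  induction xs generalizing parts with
  | nil => exact List.prefix_refl _
  | cons x xs ih =>
      simp only [List.foldl_cons]
      refine List.IsPrefix.trans ?_ (ih (PySem.Set.add parts x))
      simp [PySem.Set.add]
      split <;> simp

theorem pv_take_of_prefix_len {s t : List String} (h : s <+: t) (hl : s.length = 3) :
    t.take 3 = s := by
  obtain ⟨ext, rfl⟩ := h
  simp [hl]

-- pvInnerA is take-3 of the Set.add fold over the truthy-filtered terms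
theorem pv_innerA_eq (ts : List String) (parts : List String) (h : parts.length < 3) :
    pvInnerA parts ts = ((ts.filter (fun t => t ≠ "")).foldl PySem.Set.add parts).take 3 := by
  induction ts generalizing parts with
  | nil => simp [pvInnerA, List.take_of_length_le (by omega : parts.length ≤ 3)]
  | cons t ts ih =>
      have hadd : (if t ≠ "" ∧ t ∉ parts then parts ++ [t] else parts)
          = (List.filter (fun t => t ≠ "") [t]).foldl PySem.Set.add parts := by
        by_cases ht : t = ""
        · simp [ht]
        · by_cases hm : t ∈ parts
          · simp [ht, hm, PySem.Set.add, PySem.Set.contains]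
          · simp [ht, hm, PySem.Set.add, PySem.Set.contains]
      have hsplit : (List.filter (fun t => t ≠ "") (t :: ts)).foldl PySem.Set.add parts
          = (List.filter (fun t => t ≠ "") ts).foldl PySem.Set.add
              ((List.filter (fun t => t ≠ "") [t]).foldl PySem.Set.add parts) := by
        rw [← List.foldl_append, ← List.filter_append]
        rfl
      rw [pvInnerA, hsplit, ← hadd]
      set parts' := if t ≠ "" ∧ t ∉ parts then parts ++ [t] else parts with hp'
      have hlen : parts'.length ≤ 3 := by
        rw [hp']; split
        · simp; omega
        · omega
      split <;> rename_i h3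
      · -- break: parts'.length = 3
        have : parts'.length = 3 := by omega
        exact (pv_take_of_prefix_len (pv_foldl_add_prefix parts' _) this).symm
      · exact ih parts' (by omega)

-- pvOuterA is take-3 of the Set.add fold over the filtered chained categories
theorem pv_outerA_eq (top_terms : List (String × List String)) (cs : List String)
    (parts : List String) (h : parts.length < 3) :
    pvOuterA top_terms parts cs
      = (((cs.flatMap (fun c => (PySem.Dict.mk top_terms).getD c [])).filter
            (fun t => t ≠ "")).foldl PySem.Set.add parts).take 3 := by
  induction cs generalizing parts with
  | nil => simp [pvOuterA, List.take_of_length_le (by omega : parts.length ≤ 3)]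
  | cons c cs ih =>
      rw [pvOuterA]
      have hinner := pv_innerA_eq ((PySem.Dict.mk top_terms).getD c []) parts h
      set F₁ := (((PySem.Dict.mk top_terms).getD c []).filter (fun t => t ≠ "")).foldl
          PySem.Set.add parts with hF₁
      have hsplit : ((List.flatMap (fun c => (PySem.Dict.mk top_terms).getD c []) (c :: cs)).filter
            (fun t => t ≠ "")).foldl PySem.Set.add parts
          = ((cs.flatMap (fun c => (PySem.Dict.mk top_terms).getD c [])).filter
              (fun t => t ≠ "")).foldl PySem.Set.add F₁ := by
        rw [List.flatMap_cons, List.filter_append, List.foldl_append, hF₁]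
      rw [hsplit]
      set parts' := pvInnerA parts ((PySem.Dict.mk top_terms).getD c []) with hp'
      have hp'eq : parts' = F₁.take 3 := hinner
      have hpre : parts' <+: F₁ := hp'eq ▸ List.take_prefix 3 F₁
      have hlen : parts'.length ≤ 3 := by rw [hp'eq]; exact (List.length_take_le 3 F₁)
      split <;> rename_i h3
      · -- break: parts'.length = 3; further categories cannot change the first 3
        have h3' : parts'.length = 3 := by omega
        have hpre2 : parts' <+: ((cs.flatMap (fun c => (PySem.Dict.mk top_terms).getD c [])).filter
            (fun t => t ≠ "")).foldl PySem.Set.add F₁ :=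
          hpre.trans (pv_foldl_add_prefix F₁ _)
        exact (pv_take_of_prefix_len hpre2 h3').symm
      · -- continue: F₁ itself is already shorter than 3
        rw [ih parts' (by omega)]
        have hF₁len : F₁.length < 3 := by
          by_contra hge
          have : (F₁.take 3).length = 3 := by simp; omega
          rw [← hp'eq] at this; omega
        have : F₁.take 3 = F₁ := List.take_of_length_le (by omega)
        rw [hp'eq, this]

-- if no element of the stream is outside parts, the Set.add fold is the identity
theorem pv_foldl_add_of_find_none (stream parts : List String)
    (h : stream.find? (fun t => !parts.contains t) = none) :
    stream.foldl PySem.Set.add parts = parts := by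
  induction stream with
  | nil => rfl
  | cons x xs ih =>
      rw [List.find?_cons] at h
      split at h
      · exact absurd h (by simp)
      · rename_i hx
        have hmem : parts.contains x = true := by
          by_contra hc
          simp at hc
          simp [hc] at hx
        simp only [List.foldl_cons, PySem.Set.add, PySem.Set.contains, hmem, if_pos]
        exact ih h

-- adding the first not-yet-seen element up front does not change the Set.add fold
theorem pv_foldl_add_first (stream parts : List String) (t : String)
    (h : stream.find? (fun t => !parts.contains t) = some t) :
    stream.foldl PySem.Set.add (parts ++ [t]) = stream.foldl PySem.Set.add parts := by
  induction stream with
  | nil => simp at h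
  | cons x xs ih =>
      rw [List.find?_cons] at h
      split at h <;> rename_i hx
      · -- x ∉ parts, so t = x; both folds step to parts ++ [x]
        have ht : t = x := by simpa using h.symm
        subst ht
        have hxp : parts.contains t = false := by
          cases hc : parts.contains t
          · rfl
          · simp at hc; exact absurd hc (by simpa using hx)
        simp only [List.foldl_cons, PySem.Set.add, PySem.Set.contains, hxp]
        simp
      · -- x ∈ parts: both folds skip x (x ∈ parts ⊆ parts ++ [t])
        have hmem : parts.contains x = true := by
          by_contra hc
          simp at hc
          simp [hc] at hx
        have hmem2 : (parts ++ [t]).contains x = true := by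
          simp
          exact Or.inl (by simpa using hmem)
        simp only [List.foldl_cons, PySem.Set.add, PySem.Set.contains, hmem, hmem2, if_pos]
        exact ih h

-- pvPickB picks exactly the next distinct elements of the fold
theorem pv_pickB_eq (stream : List String) (n : Nat) (parts : List String) :
    pvPickB stream parts n = (stream.foldl PySem.Set.add parts).take (parts.length + n) := by
  induction n generalizing parts with
  | zero =>
      obtain ⟨ext, hext⟩ := pv_foldl_add_prefix parts stream
      rw [pvPickB, ← hext]
      simp
  | succ n ih =>
      cases h : stream.find? (fun t => !parts.contains t) with
      | none =>
          rw [pvPickB, h]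
          show parts = _
          rw [pv_foldl_add_of_find_none stream parts h]
          exact (List.take_of_length_le (by omega)).symm
      | some t =>
          rw [pvPickB, h]
          show pvPickB stream (parts ++ [t]) n = _
          rw [ih (parts ++ [t]), pv_foldl_add_first stream parts t h]
          have harith : (parts ++ [t]).length + n = parts.length + (n + 1) := by
            simp; omega
          rw [harith]

-- ===== VERDICT (by name: the statement is the Claim_ definition above) =====
theorem provisional_label_spec : Claim_equal_provisional_label := by
  intro parent_label top_terms _
  unfold Spec_provisional_label provisional_label provisional_label_alt pvStreamB
  have hA := pv_outerA_eq top_terms ["keywords", "frameworks", "brain_regions", "tasks"] [] (by simp)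
  have hB := pv_pickB_eq ((["keywords", "frameworks", "brain_regions", "tasks"].flatMap
      (fun c => (PySem.Dict.mk top_terms).getD c [])).filter (fun t => t ≠ "")) 3 []
  simp only [List.length_nil, Nat.zero_add] at hB
  simp only [hA, hB, PySem.List.slice_to _ (by norm_num : (0:Int) ≤ 3), List.take_take]
  rfl
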